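-- pv_equiv track=rewrite | github.com/kagepark/Import | kmport/__init__.py | ModName
-- ===== SOURCE A (Python) =====
-- def ModName(src):
--     '''
--     Analysis Module name from input string
--     '''
--     rt=True
--     class_name=None
--     module_name=None
--     alias_name=None
--     version=None
--     symbol=None
--     if isinstance(src,str):
--         src_a=src.split()
--         #remove from , import tag
--         if src_a[0] in ['from','import']:
--             del src_a[0]
--         module_name=src_a[0]
--         #remove version information
--         src_a_len=len(src_a)
--         for i in range(src_a_len-1,0,-1):
--             if src_a[i] in ['==','=','>','>=','<','<=']:
--                 if i < src_a_len:
--                     symbol=src_a[i]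
--                     version=src_a[i+1]
--                 break
--         if 'import' in src_a:
--             import_idx=src_a.index('import')
--             if src_a_len > import_idx+1:
--                 class_name=src_a[import_idx+1]
--             else:
--                 rt=False
--         if 'as' in src_a:
--             alias_idx=src_a.index('as')
--             if src_a_len > alias_idx+1:
--                 alias_name=src_a[alias_idx+1]
--             else:
--                 rt=False
--         if alias_name is None:
--             alias_name=module_name
--     return rt,module_name,alias_name,class_name,version,symbol
-- ===== SOURCE B (Python) =====
-- def ModName(src):
--     '''
--     Analysis Module name from input string
--     '''
--     src_a = src.split()
--     if src_a and src_a[0] in ('from', 'import'):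
--         src_a = src_a[1:]
--     imp_idx = None
--     as_idx = None
--     sym_idx = None
--     for i, tok in enumerate(src_a):
--         if imp_idx is None and tok == 'import':
--             imp_idx = i
--         if as_idx is None and tok == 'as':
--             as_idx = i
--         if i > 0 and tok in ('==', '=', '>', '>=', '<', '<='):
--             sym_idx = i
--     rt = True
--     module_name = src_a[0]
--     class_name = None
--     alias_name = None
--     version = None
--     symbol = None
--     if sym_idx is not None:
--         symbol = src_a[sym_idx]
--         version = src_a[sym_idx + 1]
--     if imp_idx is not None:
--         if imp_idx + 1 < len(src_a):
--             class_name = src_a[imp_idx + 1]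
--         else:
--             rt = False
--     if as_idx is not None:
--         if as_idx + 1 < len(src_a):
--             alias_name = src_a[as_idx + 1]
--         else:
--             rt = False
--     if alias_name is None:
--         alias_name = module_name
--     return rt, module_name, alias_name, class_name, version, symbol
-- ===== Notes on version B (the rewrite author's own statement) =====
-- stated objective: alternative
-- what changed: Replaces A's separate backward symbol loop plus two membership tests with `.index()` scans by a single forward pass over the token list that records the first 'import' index, the first 'as' index and the last comparison-symbol index, then assembles the result from those three indices.
-- outside the precondition, e.g. on ModName(''): A raises IndexError, B raises IndexError; on ModName('mod =='): A raises IndexError, B raises IndexError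
import Mathlib
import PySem

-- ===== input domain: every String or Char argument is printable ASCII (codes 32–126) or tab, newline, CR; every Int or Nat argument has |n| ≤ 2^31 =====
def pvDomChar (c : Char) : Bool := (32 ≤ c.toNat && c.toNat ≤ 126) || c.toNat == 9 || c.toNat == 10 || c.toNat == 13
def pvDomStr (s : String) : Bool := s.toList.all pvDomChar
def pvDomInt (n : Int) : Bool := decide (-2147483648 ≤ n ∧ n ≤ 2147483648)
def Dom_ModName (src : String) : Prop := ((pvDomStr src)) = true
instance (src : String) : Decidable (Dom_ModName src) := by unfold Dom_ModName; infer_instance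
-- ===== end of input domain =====

-- B replaces A's backward symbol loop and two `.index()` scans by ONE forward pass over the
-- token list that records the first 'import'/'as' index and the last comparison-symbol index
-- (objective: simpler/alternative decomposition, same O(n) cost).

-- ===== PORT A =====

def pySymsMN : List String := ["==", "=", ">", ">=", "<", "<="]

-- A's backward loop `for i in range(len-1, 0, -1): if src_a[i] in symbols: ...; break`,
-- transcribed as a countdown recursion on the index (counter k means current index i = k).
def modNameFindSym (l : List String) : Nat → Option (String × Option String)
  | 0 => none
  | k + 1 =>
    match l[k+1]? with
    | some t => if pySymsMN.contains t then some (t, l[k+2]?) else modNameFindSym l k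
    | none => modNameFindSym l k

def ModName (src : String) : Bool × Option String × Option String × Option String × Option String × Option String :=
  let src_a0 := PySem.Str.split₀ src
  -- `if src_a[0] in ['from','import']: del src_a[0]`  (src_a0 = [] raises in Python; outside Pre_)
  let src_a := if ["from", "import"].contains (src_a0.headD "") then src_a0.tail else src_a0
  match src_a with
  | [] => (true, none, none, none, none, none)   -- Python raises IndexError here (outside Pre_)
  | module_name :: rest =>
    let l := module_name :: rest
    let sv := modNameFindSym l (l.length - 1)
    let symbol := sv.map Prod.fst
    let version := sv.bind Prod.snd       -- none where Python raises IndexError (outside Pre_)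
    let rc : Bool × Option String :=
      if l.contains "import" then
        let import_idx := (PySem.List.index? l "import").getD 0
        if import_idx + 1 < l.length then (true, l[import_idx + 1]?) else (false, none)
      else (true, none)
    let ra : Bool × Option String :=
      if l.contains "as" then
        let alias_idx := (PySem.List.index? l "as").getD 0
        if alias_idx + 1 < l.length then (true, l[alias_idx + 1]?) else (false, none)
      else (true, none)
    let alias_name := (ra.2).getD module_name
    (rc.1 && ra.1, some module_name, some alias_name, rc.2, version, symbol)

-- ===== PORT B =====

-- B's single forward pass: state = (first 'import' index, first 'as' index, last symbol index)
def modNameScanStep (s : Option Int × Option Int × Option Int) (p : Int × String) :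
    Option Int × Option Int × Option Int :=
  let imp := if s.1.isNone && (p.2 == "import") then some p.1 else s.1
  let asx := if s.2.1.isNone && (p.2 == "as") then some p.1 else s.2.1
  let sym := if (decide (0 < p.1)) && pySymsMN.contains p.2 then some p.1 else s.2.2
  (imp, asx, sym)

def ModName_alt (src : String) : Bool × Option String × Option String × Option String × Option String × Option String :=
  let src_a0 := PySem.Str.split₀ src
  -- `if src_a and src_a[0] in ('from','import'): src_a = src_a[1:]`
  let src_a := if (decide (src_a0 ≠ [])) && (["from", "import"].contains (src_a0.headD "")) then
      src_a0.drop 1 else src_a0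
  match src_a with
  | [] => (true, none, none, none, none, none)   -- B raises IndexError at src_a[0] (outside Pre_)
  | module_name :: rest =>
    let l := module_name :: rest
    let st := (PySem.List.enumerate l 0).foldl modNameScanStep (none, none, none)
    let symbol := (st.2.2).bind (fun i => PySem.List.pyGet? l i)
    let version := (st.2.2).bind (fun i => PySem.List.pyGet? l (i + 1))
    let rc : Bool × Option String :=
      match st.1 with
      | some i => if i + 1 < (l.length : Int) then (true, PySem.List.pyGet? l (i + 1)) else (false, none)
      | none => (true, none)
    let ra : Bool × Option String :=
      match st.2.1 with
      | some i => if i + 1 < (l.length : Int) then (true, PySem.List.pyGet? l (i + 1)) else (false, none)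
      | none => (true, none)
    let alias_name := (ra.2).getD module_name
    (rc.1 && ra.1, some module_name, some alias_name, rc.2, version, symbol)

-- ===== PRECONDITION & SPEC =====
-- Pre_ excludes exactly the inputs where the Python raises IndexError: a string with no tokens
-- left after stripping a leading 'from'/'import', and a string whose last token is a comparison
-- symbol with another token before it (then `src_a[i+1]` is read past the end).
def Pre_ModName (src : String) : Prop :=
  let src_a0 := PySem.Str.split₀ src
  let l := if ["from", "import"].contains (src_a0.headD "") then src_a0.tail else src_a0
  l ≠ [] ∧ ¬ (2 ≤ l.length ∧ pySymsMN.contains (l.getLast?.getD "") = true)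
instance (src : String) : Decidable (Pre_ModName src) := by unfold Pre_ModName; infer_instance

def pvWitness_ModName : String := "from numpy import array as arr"

def Spec_ModName (src : String) (out : Bool × Option String × Option String × Option String × Option String × Option String) : Prop := out = ModName_alt src
instance (src : String) (out : Bool × Option String × Option String × Option String × Option String × Option String) : Decidable (Spec_ModName src out) := by unfold Spec_ModName; infer_instance

-- ===== CLAIM (what is proved, stated in full; the proofs are below) =====
def Claim_equal_ModName : Prop := ∀ (src : String), Dom_ModName src → Pre_ModName src → Spec_ModName src (ModName src)

-- ===== LEMMAS AND PROOFS =====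

-- last index of a comparison symbol in a list (front recursion, proof helper)
def lastSymIdxMN : List String → Option Nat
  | [] => none
  | t :: ts =>
    match lastSymIdxMN ts with
    | some k => some (k + 1)
    | none => if pySymsMN.contains t then some 0 else none

-- greatest index i with 1 ≤ i ≤ j, i < l.length and l[i] a symbol (counter recursion)
def maxSymLeMN (l : List String) : Nat → Option Nat
  | 0 => none
  | k + 1 =>
    if pySymsMN.contains (l.getD (k+1) "") && decide (k + 1 < l.length) then some (k + 1)
    else maxSymLeMN l k

theorem findSym_eq (l : List String) (j : Nat) :
    modNameFindSym l j = (maxSymLeMN l j).bind (fun i => (l[i]?).map (fun t => (t, l[i+1]?))) := by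
  induction j with
  | zero => rfl
  | succ k ih =>
    unfold modNameFindSym maxSymLeMN
    cases h : l[k+1]? with
    | none =>
      have hlen : ¬ (k + 1 < l.length) := by
        intro hlt
        rw [List.getElem?_eq_getElem hlt] at h
        simp at h
      simp [hlen, List.getD, ih]
    | some t =>
      have hlt : k + 1 < l.length := (List.getElem?_eq_some_iff.mp h).1
      have he : l[k+1] = t := by
        rw [List.getElem?_eq_getElem hlt] at h
        exact Option.some.inj h
      by_cases hc : t ∈ pySymsMN
      · simp [List.getD, hlt, he, hc]
      · simp [List.getD, hlt, he, hc, ih]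

theorem maxSymLe_some (l : List String) (j i : Nat) (h : maxSymLeMN l j = some i) :
    1 ≤ i ∧ i < l.length := by
  induction j with
  | zero => simp [maxSymLeMN] at h
  | succ k ih =>
    unfold maxSymLeMN at h
    split at h
    · rename_i hcond
      cases h
      simp at hcond
      exact ⟨by omega, hcond.2⟩
    · exact ih h

theorem maxSymLe_append (l : List String) (t : String) (j : Nat) (h : j < l.length) :
    maxSymLeMN (l ++ [t]) j = maxSymLeMN l j := by
  induction j with
  | zero => rfl
  | succ k ih =>
    unfold maxSymLeMN
    have h1 : k + 1 < l.length := h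
    have hg : (l ++ [t]).getD (k+1) "" = l.getD (k+1) "" := by
      simp [List.getD, List.getElem?_append_left h1]
    rw [hg, ih (by omega)]
    simp [h1, Nat.lt_of_succ_lt h1]

theorem lastSym_append (ts : List String) (t : String) :
    lastSymIdxMN (ts ++ [t]) =
      if pySymsMN.contains t then some ts.length else lastSymIdxMN ts := by
  induction ts with
  | nil => simp [lastSymIdxMN]
  | cons h ts ih =>
    by_cases hc : t ∈ pySymsMN
    · simp only [List.cons_append, lastSymIdxMN, ih]
      cases lastSymIdxMN ts <;> simp [hc]
    · simp only [List.cons_append, lastSymIdxMN, ih]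
      simp [hc]

theorem maxSym_eq_lastSym (m : String) (rest : List String) :
    maxSymLeMN (m :: rest) rest.length = (lastSymIdxMN rest).map (· + 1) := by
  induction rest using List.reverseRecOn with
  | nil => rfl
  | append_singleton ts t ih =>
    have hlen : (ts ++ [t]).length = ts.length + 1 := by simp
    rw [hlen]
    unfold maxSymLeMN
    have hget : (m :: (ts ++ [t])).getD (ts.length + 1) "" = t := by
      simp [List.getD]
    have hlt : ts.length + 1 < (m :: (ts ++ [t])).length := by simp
    rw [hget, lastSym_append]
    by_cases hc : t ∈ pySymsMN
    · simp [hc]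
    · have hmt : (m :: (ts ++ [t])) = (m :: ts) ++ [t] := by simp
      rw [if_neg (by simp [hc]), hmt,
        maxSymLe_append (m :: ts) t ts.length (by simp), ih]
      simp [hc]

def pickMN (a x : Option Int) : Option Int :=
  match a with
  | some v => some v
  | none => x

theorem pick_cons (v t : String) (ts : List String) (s : Int) :
    pickMN (if t == v then some s else none)
        ((PySem.List.index? ts v).map (fun k : Nat => s + 1 + (k : Int))) =
      (PySem.List.index? (t :: ts) v).map (fun k : Nat => s + (k : Int)) := by
  by_cases ht : t = v
  · subst ht
    rw [PySem.List.index?_cons_self]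
    simp [pickMN]
  · rw [PySem.List.index?_cons_of_ne ts ht]
    cases PySem.List.index? ts v with
    | none => simp [pickMN, ht]
    | some k =>
      simp [pickMN, ht]
      ring

theorem fold_char (rest : List String) : ∀ (s : Int) (a b c : Option Int), 1 ≤ s →
    (PySem.List.enumerate rest s).foldl modNameScanStep (a, b, c) =
      (pickMN a ((PySem.List.index? rest "import").map (fun k : Nat => s + (k : Int))),
       pickMN b ((PySem.List.index? rest "as").map (fun k : Nat => s + (k : Int))),
       match lastSymIdxMN rest with
       | some k => some (s + (k : Int))
       | none => c) := by
  induction rest with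
  | nil =>
    intro s a b c _
    simp only [PySem.List.enumerate, List.foldl_nil, lastSymIdxMN]
    rw [show PySem.List.index? ([] : List String) "import" = none from rfl,
        show PySem.List.index? ([] : List String) "as" = none from rfl]
    cases a <;> cases b <;> rfl
  | cons t ts ih =>
    intro s a b c hs
    rw [PySem.List.enumerate_cons]
    simp only [List.foldl_cons]
    rw [show modNameScanStep (a, b, c) (s, t) =
        ((if a.isNone && (t == "import") then some s else a),
         (if b.isNone && (t == "as") then some s else b),
         (if (decide (0 < s)) && pySymsMN.contains t then some s else c)) from rfl]
    rw [ih (s+1) _ _ _ (by omega)]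
    have hpos : decide (0 < s) = true := by simp; omega
    refine Prod.ext ?_ (Prod.ext ?_ ?_)
    · -- import component
      cases a with
      | some v => simp [pickMN]
      | none =>
        dsimp only
        rw [show (if ((none : Option Int).isNone && (t == "import")) = true then some s
            else (none : Option Int)) =
            (if (t == "import") = true then some s else none) from by simp,
          show pickMN none ((PySem.List.index? (t :: ts) "import").map
            (fun k : Nat => s + (k : Int))) =
            (PySem.List.index? (t :: ts) "import").map (fun k : Nat => s + (k : Int)) from rfl]
        exact pick_cons "import" t ts s
    · -- as component
      cases b with
      | some v => simp [pickMN]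
      | none =>
        dsimp only
        rw [show (if ((none : Option Int).isNone && (t == "as")) = true then some s
            else (none : Option Int)) =
            (if (t == "as") = true then some s else none) from by simp,
          show pickMN none ((PySem.List.index? (t :: ts) "as").map
            (fun k : Nat => s + (k : Int))) =
            (PySem.List.index? (t :: ts) "as").map (fun k : Nat => s + (k : Int)) from rfl]
        exact pick_cons "as" t ts s
    · -- symbol component
      dsimp only
      rw [hpos]
      simp only [Bool.true_and, lastSymIdxMN]
      cases hls : lastSymIdxMN ts with
      | some k =>
        simp only []
        rw [show ((s : Int) + 1 + (k : Int)) = (s + ((k : Nat) + 1 : Nat)) from by push_cast; ring]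
      | none =>
        by_cases hc : t ∈ pySymsMN
        · simp [hc]
        · simp [hc]

theorem pick_head (v m : String) (ts : List String) :
    pickMN (if m == v then some 0 else none)
        ((PySem.List.index? ts v).map (fun k : Nat => 1 + (k : Int))) =
      (PySem.List.index? (m :: ts) v).map (fun k : Nat => (k : Int)) := by
  by_cases hm : m = v
  · subst hm
    rw [PySem.List.index?_cons_self]
    simp [pickMN]
  · rw [PySem.List.index?_cons_of_ne ts hm]
    cases PySem.List.index? ts v with
    | none => simp [pickMN, hm]
    | some k =>
      simp [pickMN, hm]
      ring

theorem rc_agree (l : List String) (v : String) :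
    (if l.contains v then
       (if ((PySem.List.index? l v).getD 0) + 1 < l.length then
          (true, l[((PySem.List.index? l v).getD 0) + 1]?)
        else (false, (none : Option String)))
     else (true, none))
    = (match (PySem.List.index? l v).map (fun k : Nat => (k : Int)) with
       | some i => if i + 1 < (l.length : Int) then (true, PySem.List.pyGet? l (i + 1)) else (false, none)
       | none => (true, none)) := by
  cases h : PySem.List.index? l v with
  | none =>
    have hv : v ∉ l := (PySem.List.index?_eq_none_iff l v).mp h
    simp [hv]
  | some idx =>
    have hv : v ∈ l := by
      rw [← PySem.List.index?_isSome_iff (xs := l) (v := v), h]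
      rfl
    have hcv : l.contains v = true := by simpa using hv
    rw [hcv, if_pos rfl]
    simp only [Option.getD_some, Option.map_some]
    by_cases hb : idx + 1 < l.length
    · have hb' : ((idx : Int) + 1 < (l.length : Int)) := by omega
      rw [if_pos hb, if_pos hb',
        show ((idx : Int) + 1) = ((idx + 1 : Nat) : Int) from by push_cast; ring,
        PySem.List.pyGet?_natCast]
    · have hb' : ¬ ((idx : Int) + 1 < (l.length : Int)) := by omega
      rw [if_neg hb, if_neg hb']

theorem ModName_agree (src : String) : ModName src = ModName_alt src := by
  simp only [ModName, ModName_alt]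
  have hL : (if (decide (PySem.Str.split₀ src ≠ [])) &&
        (["from", "import"].contains ((PySem.Str.split₀ src).headD "")) then
        (PySem.Str.split₀ src).drop 1 else PySem.Str.split₀ src)
      = (if ["from", "import"].contains ((PySem.Str.split₀ src).headD "") then
          (PySem.Str.split₀ src).tail else PySem.Str.split₀ src) := by
    cases PySem.Str.split₀ src <;> simp
  rw [hL]
  cases hl : (if ["from", "import"].contains ((PySem.Str.split₀ src).headD "") then
      (PySem.Str.split₀ src).tail else PySem.Str.split₀ src) with
  | nil => rfl
  | cons m rest =>
    clear hl hL
    dsimp only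
    rw [findSym_eq, show (m :: rest).length - 1 = rest.length from by simp,
      maxSym_eq_lastSym m rest]
    rw [PySem.List.enumerate_cons, List.foldl_cons,
      show modNameScanStep (none, none, none) ((0 : Int), m) =
        ((if m == "import" then some 0 else none),
         (if m == "as" then some 0 else none), (none : Option Int)) from by
          simp [modNameScanStep],
      show ((0 : Int) + 1) = 1 from by norm_num,
      fold_char rest 1 _ _ _ (by omega)]
    dsimp only
    rw [pick_head "import" m rest, pick_head "as" m rest, ← rc_agree, ← rc_agree]
    cases hs : lastSymIdxMN rest with
    | none => simp
    | some k =>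
      have hk : k + 1 < (m :: rest).length :=
        (maxSymLe_some (m :: rest) rest.length (k + 1)
          (by rw [maxSym_eq_lastSym, hs]; rfl)).2
      have hget : (m :: rest)[k+1]? = some (m :: rest)[k+1] := List.getElem?_eq_getElem hk
      simp [hget]
      constructor
      · rw [show ((1 : Int) + (k : Int) + 1) = ((k + 2 : Nat) : Int) from by push_cast; ring,
          PySem.List.pyGet?_natCast]
        simp
      · rw [show ((1 : Int) + (k : Int)) = ((k + 1 : Nat) : Int) from by push_cast; ring,
          PySem.List.pyGet?_natCast, hget]
        simp

-- ===== VERDICT (by name: the statement is the Claim_ definition above) =====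
theorem ModName_spec : Claim_equal_ModName := by
  intro src _ _
  unfold Spec_ModName
  exact ModName_agree src
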